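-- pv_equiv track=rewrite | github.com/victori444/eyeMouse | test.py | get_key_at_position
-- ===== SOURCE A (Python) =====
-- KEYS = [
--     ['1', '2', '3', '4', '5', '6', '7', '8', '9', '0', '-', '=', 'Backspace'],
--     ['Q', 'W', 'E', 'R', 'T', 'Y', 'U', 'I', 'O', 'P', '[', ']', '\\'],
--     ['A', 'S', 'D', 'F', 'G', 'H', 'J', 'K', 'L', ';', '\'', 'Enter'],
--     ['Z', 'X', 'C', 'V', 'B', 'N', 'M', ',', '.', '/', 'Shift'],
--     ['Space']
-- ]
--
-- KEY_WIDTH = 40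
--
-- KEY_HEIGHT = 40
--
-- KEY_MARGIN = 4
--
-- KEY_POS = (20, 50)
--
-- def get_key_at_position(x, y):
--     """
--     Determine which key is at the given screen position
--     """
--     y_offset = KEY_POS[1]
--     for row in KEYS:
--         x_offset = KEY_POS[0]
--         for key in row:
--             if x_offset <= x <= x_offset + KEY_WIDTH and y_offset <= y <= y_offset + KEY_HEIGHT:
--                 return key
--             x_offset += KEY_WIDTH + KEY_MARGIN
--         y_offset += KEY_HEIGHT + KEY_MARGIN
--     return None
-- ===== SOURCE B (Python) =====
-- KEYS = [
--     ['1', '2', '3', '4', '5', '6', '7', '8', '9', '0', '-', '=', 'Backspace'],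
--     ['Q', 'W', 'E', 'R', 'T', 'Y', 'U', 'I', 'O', 'P', '[', ']', '\\'],
--     ['A', 'S', 'D', 'F', 'G', 'H', 'J', 'K', 'L', ';', '\'', 'Enter'],
--     ['Z', 'X', 'C', 'V', 'B', 'N', 'M', ',', '.', '/', 'Shift'],
--     ['Space']
-- ]
--
-- KEY_WIDTH = 40
--
-- KEY_HEIGHT = 40
--
-- KEY_MARGIN = 4
--
-- KEY_POS = (20, 50)
--
-- def get_key_at_position(x, y):
--     """
--     Determine which key is at the given screen position
--     """
--     row, ry = divmod(y - KEY_POS[1], KEY_HEIGHT + KEY_MARGIN)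
--     col, rx = divmod(x - KEY_POS[0], KEY_WIDTH + KEY_MARGIN)
--     if 0 <= row < len(KEYS) and 0 <= col < len(KEYS[row]) and rx <= KEY_WIDTH and ry <= KEY_HEIGHT:
--         return KEYS[row][col]
--     return None
-- ===== Notes on version B (the rewrite author's own statement) =====
-- stated objective: simpler
-- what changed: Replaces the nested scan over every key (advancing x/y offsets and testing each cell) with a closed-form divmod computation of the row and column index plus a remainder check against the key size, then a single bounds-checked lookup in KEYS.
import Mathlib
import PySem

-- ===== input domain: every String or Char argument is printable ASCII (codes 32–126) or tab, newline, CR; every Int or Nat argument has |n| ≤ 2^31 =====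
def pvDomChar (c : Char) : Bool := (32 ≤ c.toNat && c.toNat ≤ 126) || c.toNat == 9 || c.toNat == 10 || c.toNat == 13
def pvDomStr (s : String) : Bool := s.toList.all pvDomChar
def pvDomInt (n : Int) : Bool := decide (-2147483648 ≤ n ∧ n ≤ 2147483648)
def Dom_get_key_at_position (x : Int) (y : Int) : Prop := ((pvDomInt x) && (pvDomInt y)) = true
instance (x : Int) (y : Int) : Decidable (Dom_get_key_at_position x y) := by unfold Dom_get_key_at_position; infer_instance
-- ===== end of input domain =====

-- B replaces A's nested scan over all keys with a closed-form row/column computation via divmod (simpler, constant work).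

-- module constants, shared by both ports
def KEYSL : List (List String) :=
  [["1", "2", "3", "4", "5", "6", "7", "8", "9", "0", "-", "=", "Backspace"],
   ["Q", "W", "E", "R", "T", "Y", "U", "I", "O", "P", "[", "]", "\\"],
   ["A", "S", "D", "F", "G", "H", "J", "K", "L", ";", "'", "Enter"],
   ["Z", "X", "C", "V", "B", "N", "M", ",", ".", "/", "Shift"],
   ["Space"]]

def KEY_WIDTH : Int := 40
def KEY_HEIGHT : Int := 40
def KEY_MARGIN : Int := 4
def KEY_POS : Int × Int := (20, 50)

-- ===== PORT A =====
-- inner 'for key in row' loop: returns the key on a hit, none to fall through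
def rowScanA (x y : Int) (xoff yoff : Int) : List String → Option String
  | [] => none
  | k :: ks =>
      if xoff ≤ x ∧ x ≤ xoff + KEY_WIDTH ∧ yoff ≤ y ∧ y ≤ yoff + KEY_HEIGHT then some k
      else rowScanA x y (xoff + (KEY_WIDTH + KEY_MARGIN)) yoff ks

-- outer 'for row in KEYS' loop
def keyScanA (x y : Int) (yoff : Int) : List (List String) → Option String
  | [] => none
  | r :: rs =>
      match rowScanA x y KEY_POS.1 yoff r with
      | some k => some k
      | none => keyScanA x y (yoff + (KEY_HEIGHT + KEY_MARGIN)) rs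

def get_key_at_position (x : Int) (y : Int) : Option String :=
  keyScanA x y KEY_POS.2 KEYSL

-- ===== PORT B =====
def get_key_at_position_alt (x : Int) (y : Int) : Option String :=
  let row := PySem.Int.floordiv (y - KEY_POS.2) (KEY_HEIGHT + KEY_MARGIN)
  let ry  := PySem.Int.mod (y - KEY_POS.2) (KEY_HEIGHT + KEY_MARGIN)
  let col := PySem.Int.floordiv (x - KEY_POS.1) (KEY_WIDTH + KEY_MARGIN)
  let rx  := PySem.Int.mod (x - KEY_POS.1) (KEY_WIDTH + KEY_MARGIN)
  if 0 ≤ row ∧ row < (KEYSL.length : Int) then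
    match PySem.List.pyGet? KEYSL row with
    | some r =>
        if 0 ≤ col ∧ col < (r.length : Int) ∧ rx ≤ KEY_WIDTH ∧ ry ≤ KEY_HEIGHT then
          PySem.List.pyGet? r col
        else none
    | none => none
  else none

-- ===== PRECONDITION & SPEC =====
def Spec_get_key_at_position (x : Int) (y : Int) (out : Option String) : Prop := out = get_key_at_position_alt x y
instance (x : Int) (y : Int) (out : Option String) : Decidable (Spec_get_key_at_position x y out) := by unfold Spec_get_key_at_position; infer_instance

-- ===== CLAIM (what is proved, stated in full; the proofs are below) =====
def Claim_equal_get_key_at_position : Prop := ∀ (x : Int) (y : Int), Dom_get_key_at_position x y → Spec_get_key_at_position x y (get_key_at_position x y)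

-- ===== LEMMAS AND PROOFS =====

-- closed form of the inner scan
lemma rowScanA_eq (ks : List String) (x y xoff yoff : Int) :
    rowScanA x y xoff yoff ks =
      if yoff ≤ y ∧ y ≤ yoff + 40 ∧ 0 ≤ x - xoff ∧ (x - xoff) / 44 < (ks.length : Int) ∧ (x - xoff) % 44 ≤ 40
      then ks[((x - xoff) / 44).toNat]? else none := by
  induction ks generalizing xoff with
  | nil => simp [rowScanA]
  | cons k ks ih =>
      rw [rowScanA]
      rw [show KEY_WIDTH = (40 : Int) from rfl, show KEY_HEIGHT = (40 : Int) from rfl,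
          show KEY_MARGIN = (4 : Int) from rfl]
      simp only [List.length_cons]
      by_cases hhit : xoff ≤ x ∧ x ≤ xoff + 40 ∧ yoff ≤ y ∧ y ≤ yoff + 40
      · rw [if_pos hhit]
        have h0 : (x - xoff) / 44 = 0 := by omega
        rw [if_pos (by omega)]
        simp [h0]
      · rw [if_neg hhit, show xoff + (40 + 4) = xoff + 44 from by ring, ih]
        by_cases hy : yoff ≤ y ∧ y ≤ yoff + 40
        · by_cases hlo : x - xoff < 0
          · rw [if_neg (by omega), if_neg (by omega)]
          · by_cases hmar : x - xoff < 44
            · -- x - xoff ∈ [41, 43]: margin gap on the left, out of range on the right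
              rw [if_neg (by omega), if_neg (by omega)]
            · -- x - xoff ≥ 44: shift the column index by one
              by_cases hcond : (x - xoff) / 44 < (ks.length : Int) + 1 ∧ (x - xoff) % 44 ≤ 40
              · rw [if_pos (by omega), if_pos (by omega),
                    show ((x - xoff) / 44).toNat = ((x - (xoff + 44)) / 44).toNat + 1 from by omega,
                    List.getElem?_cons_succ]
              · rw [if_neg (by omega), if_neg (by omega)]
        · rw [if_neg (by omega), if_neg (by omega)]

-- closed form of the whole scan: one flat guard over row index, row remainder, column index, column remainder
lemma keyScanA_eq (rs : List (List String)) (x y yoff : Int) :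
    keyScanA x y yoff rs =
      if 0 ≤ y - yoff ∧ (y - yoff) / 44 < (rs.length : Int) ∧ (y - yoff) % 44 ≤ 40 ∧
         0 ≤ x - 20 ∧ (x - 20) / 44 < ((rs.getD ((y - yoff) / 44).toNat []).length : Int) ∧ (x - 20) % 44 ≤ 40
      then (rs.getD ((y - yoff) / 44).toNat [])[((x - 20) / 44).toNat]? else none := by
  induction rs generalizing yoff with
  | nil => simp [keyScanA]
  | cons r rs ih =>
      rw [keyScanA, rowScanA_eq]
      rw [show KEY_POS.1 = (20 : Int) from rfl, show KEY_HEIGHT + KEY_MARGIN = (44 : Int) from rfl]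
      by_cases hy : yoff ≤ y ∧ y ≤ yoff + 40
      · have h0 : (y - yoff) / 44 = 0 := by omega
        rw [h0]
        simp only [Int.toNat_zero, List.getD_cons_zero, List.length_cons]
        by_cases hc : 0 ≤ x - 20 ∧ (x - 20) / 44 < (r.length : Int) ∧ (x - 20) % 44 ≤ 40
        · have hlt : ((x - 20) / 44).toNat < r.length := by omega
          rw [if_pos (show yoff ≤ y ∧ y ≤ yoff + 40 ∧ 0 ≤ x - 20 ∧ (x - 20) / 44 < (r.length : Int) ∧ (x - 20) % 44 ≤ 40 from by omega),
              List.getElem?_eq_getElem hlt]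
          rw [if_pos (by omega)]
        · rw [if_neg (show ¬(yoff ≤ y ∧ y ≤ yoff + 40 ∧ 0 ≤ x - 20 ∧ (x - 20) / 44 < (r.length : Int) ∧ (x - 20) % 44 ≤ 40) from by omega)]
          rw [ih, if_neg (by omega), if_neg (by omega)]
      · rw [if_neg (show ¬(yoff ≤ y ∧ y ≤ yoff + 40 ∧ 0 ≤ x - 20 ∧ (x - 20) / 44 < (r.length : Int) ∧ (x - 20) % 44 ≤ 40) from by omega)]
        rw [ih]
        simp only [List.length_cons]
        by_cases hlo : y - yoff < 0
        · rw [if_neg (by omega), if_neg (by omega)]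
        · by_cases hmar : y - yoff < 44
          · rw [if_neg (by omega), if_neg (by omega)]
          · rw [show ((y - yoff) / 44).toNat = ((y - (yoff + 44)) / 44).toNat + 1 from by omega,
                List.getD_cons_succ]
            by_cases hcond : 0 ≤ y - (yoff + 44) ∧ (y - (yoff + 44)) / 44 < (rs.length : Int) ∧ (y - (yoff + 44)) % 44 ≤ 40 ∧
                0 ≤ x - 20 ∧ (x - 20) / 44 < ((rs.getD ((y - (yoff + 44)) / 44).toNat []).length : Int) ∧ (x - 20) % 44 ≤ 40
            · rw [if_pos hcond, if_pos (by omega)]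
            · rw [if_neg hcond, if_neg (by omega)]

-- ===== VERDICT (by name: the statement is the Claim_ definition above) =====
theorem get_key_at_position_spec : Claim_equal_get_key_at_position := by
  intro x y _
  unfold Spec_get_key_at_position get_key_at_position get_key_at_position_alt
  rw [keyScanA_eq]
  rw [show KEY_POS.1 = (20 : Int) from rfl, show KEY_POS.2 = (50 : Int) from rfl,
      show KEY_WIDTH + KEY_MARGIN = (44 : Int) from rfl,
      show KEY_HEIGHT + KEY_MARGIN = (44 : Int) from rfl,
      show KEY_WIDTH = (40 : Int) from rfl, show KEY_HEIGHT = (40 : Int) from rfl]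
  rw [PySem.Int.floordiv_eq_ediv_of_pos (a := y - 50) (by norm_num),
      PySem.Int.floordiv_eq_ediv_of_pos (a := x - 20) (by norm_num),
      PySem.Int.mod_eq_emod_of_pos (a := y - 50) (by norm_num),
      PySem.Int.mod_eq_emod_of_pos (a := x - 20) (by norm_num)]
  by_cases hrow : 0 ≤ (y - 50) / 44 ∧ (y - 50) / 44 < (KEYSL.length : Int)
  · rw [if_pos hrow, PySem.List.pyGet?_of_nonneg KEYSL hrow.1]
    have hlt : ((y - 50) / 44).toNat < KEYSL.length := by omega
    rw [List.getElem?_eq_getElem hlt,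
        show KEYSL.getD ((y - 50) / 44).toNat [] = KEYSL[((y - 50) / 44).toNat] from List.getD_eq_getElem KEYSL [] hlt]
    simp only []
    by_cases hcol : 0 ≤ (x - 20) / 44 ∧ (x - 20) / 44 < ((KEYSL[((y - 50) / 44).toNat]).length : Int) ∧ (x - 20) % 44 ≤ 40 ∧ (y - 50) % 44 ≤ 40
    · rw [if_pos (by omega), if_pos hcol,
          PySem.List.pyGet?_of_nonneg (KEYSL[((y - 50) / 44).toNat]) hcol.1]
    · rw [if_neg (by omega), if_neg hcol]
  · rw [if_neg (by omega), if_neg hrow]
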